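-- pv_equiv track=rewrite | github.com/Rutuja1221/gfg-potd-2024 | 28_01_2024.py | findNthNumber
-- ===== SOURCE A (Python) =====
-- def findNthNumber(n: int, k: int) -> int:
--     def ncr(n, r):
--         ans = 1
--
--         # n! / ((n - r)! * r!)
--         for i in range(n, max(r, n - r), -1):
--             ans *= i
--
--         den = 1
--
--         for i in range(1, min(r, n - r) + 1):
--             den *= i
--
--         ans //= den
--
--         return ans
--
--     dp = [[0] * (k + 1) for _ in range(63)]
--
--     for i in range(63):
--         for j in range(k + 1):
--             for x in range(min(i + 1, j) + 1):
--                 dp[i][j] += ncr(i + 1, x)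
--
--     pos = 0
--
--     for i in range(63):
--         if dp[i][k] >= n:
--             pos = i
--             break
--
--     ans = 0
--
--     while pos > -1 and n > 0:
--         if pos + 1 <= k:
--             ans += n - 1
--             break
--
--         if pos > 0 and dp[pos - 1][k] < n:
--             ans |= (1 << pos)
--             n -= dp[pos - 1][k]
--             k = max(k - 1, 0)
--
--         pos -= 1
--
--     return ans
-- ===== SOURCE B (Python) =====
-- def findNthNumber(n: int, k: int) -> int:
--     # Pascal's triangle rows 0..63, built once; replaces A's O(63*k) table of
--     # per-cell factorial recomputations.
--     C = [[1]]
--     row = [1]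
--     for m in range(1, 64):
--         row = [1] + [row[t - 1] + row[t] for t in range(1, m)] + [1]
--         C.append(row)
--
--     def count(m, j):
--         # how many x in [0, 2**m) have at most j set bits
--         if j >= m:
--             return 1 << m
--         return sum(C[m][:j + 1])
--
--     pos = next((i for i in range(63) if count(i + 1, k) >= n), 0)
--
--     def go(pos, n, k, ans):
--         if pos < 0 or n <= 0:
--             return ans
--         if pos + 1 <= k:
--             return ans + n - 1
--         if pos > 0 and count(pos, k) < n:
--             return go(pos - 1, n - count(pos, k), max(k - 1, 0), ans | (1 << pos))
--         return go(pos - 1, n, k, ans)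
--
--     return go(pos, n, k, 0)
-- ===== Notes on version B (the rewrite author's own statement) =====
-- stated objective: faster
-- what changed: Replaces A's 63x(k+1) DP table whose every cell re-runs a factorial-product ncr loop with one Pascal's-triangle precomputation (64 rows) and prefix sums, making the count of numbers below 2^m with at most j set bits O(1)-ish per query and the whole function independent of k's magnitude.
import Mathlib
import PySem

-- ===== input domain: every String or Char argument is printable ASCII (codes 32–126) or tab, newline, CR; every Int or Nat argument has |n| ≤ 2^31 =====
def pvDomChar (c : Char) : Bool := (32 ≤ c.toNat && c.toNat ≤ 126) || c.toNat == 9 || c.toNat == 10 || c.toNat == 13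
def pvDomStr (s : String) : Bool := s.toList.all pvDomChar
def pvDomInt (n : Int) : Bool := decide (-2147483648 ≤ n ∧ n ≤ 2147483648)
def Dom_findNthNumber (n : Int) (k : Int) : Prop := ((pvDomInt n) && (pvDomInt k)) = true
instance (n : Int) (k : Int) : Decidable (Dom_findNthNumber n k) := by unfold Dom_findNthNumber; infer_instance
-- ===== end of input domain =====

-- B replaces A's per-cell factorial ncr recomputations by one Pascal-triangle
-- precomputation with prefix sums; equivalence is proved for k ≥ 0 (A raises
-- IndexError for k < 0).

-- ===== PORT A =====
-- ncr(n, r): two product loops then floor division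
def ncrA (n r : Int) : Int :=
  let ans := (PySem.List.pyRange n (max r (n - r)) (-1)).foldl (fun a i => a * i) 1
  let den := (PySem.List.pyRange 1 (min r (n - r) + 1) 1).foldl (fun a i => a * i) 1
  PySem.Int.floordiv ans den

-- dp[i][j] starts at 0 and is filled by its own x-loop, so the triple loop is
-- rendered as nested maps over the same ranges with the x-loop as a foldl from 0.
def dpA (k : Int) : List (List Int) :=
  (PySem.List.pyRange 0 63 1).map fun i =>
    (PySem.List.pyRange 0 (k + 1) 1).map fun j =>
      (PySem.List.pyRange 0 (min (i + 1) j + 1) 1).foldl (fun a x => a + ncrA (i + 1) x) 0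

-- dp[i][j]; in-range on every lookup the algorithm performs when k ≥ 0 (Pre_)
def dpGetA (dp : List (List Int)) (i j : Int) : Int :=
  PySem.List.pyGetD (PySem.List.pyGetD dp i []) j 0

-- the while loop; pos < 63 and decreases every iteration, so fuel 64 is exact
def loopA (fuel : Nat) (dp : List (List Int)) (pos n k ans : Int) : Int :=
  match fuel with
  | 0 => ans
  | fuel + 1 =>
    if pos > -1 ∧ n > 0 then
      if pos + 1 ≤ k then ans + (n - 1)
      else if pos > 0 ∧ dpGetA dp (pos - 1) k < n then
        -- 1 << pos with pos > 0: exact as 2 ^ pos.toNat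
        loopA fuel dp (pos - 1) (n - dpGetA dp (pos - 1) k) (max (k - 1) 0)
          (Int.lor ans (2 ^ pos.toNat))
      else loopA fuel dp (pos - 1) n k ans
    else ans

def findNthNumber (n : Int) (k : Int) : Int :=
  let dp := dpA k
  -- for i in range(63): if dp[i][k] >= n: pos = i; break   (pos preset to 0)
  let pos := ((PySem.List.pyRange 0 63 1).find? (fun i => decide (dpGetA dp i k ≥ n))).getD 0
  loopA 64 dp pos n k 0

-- ===== PORT B =====
-- row m of Pascal's triangle from row m-1 (the list comprehension in Source B)
def rowB (row : List Int) (m : Nat) : List Int :=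
  [1] ++ ((List.range' 1 (m - 1)).map fun t => row.getD (t - 1) 0 + row.getD t 0) ++ [1]

-- C = rows 0..63, built by the for-loop carrying (C, row)
def pascalB : List (List Int) :=
  ((List.range' 1 63).foldl
    (fun (st : List (List Int) × List Int) m =>
      let r := rowB st.2 m
      (st.1 ++ [r], r))
    ([[1]], [1])).1

-- count(m, j) = numbers in [0, 2**m) with at most j set bits (1 ≤ m ≤ 63 at call sites)
def countB (m j : Int) : Int :=
  if j ≥ m then 2 ^ m.toNat  -- 1 << m, exact since m ≥ 1 at every call site
  else (PySem.List.slice (PySem.List.pyGetD pascalB m []) none (some (j + 1))).foldl (· + ·) 0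

def goB (fuel : Nat) (pos n k ans : Int) : Int :=
  match fuel with
  | 0 => ans
  | fuel + 1 =>
    if pos < 0 ∨ n ≤ 0 then ans
    else if pos + 1 ≤ k then ans + n - 1
    else if pos > 0 ∧ countB pos k < n then
      goB fuel (pos - 1) (n - countB pos k) (max (k - 1) 0) (Int.lor ans (2 ^ pos.toNat))
    else goB fuel (pos - 1) n k ans

def findNthNumber_alt (n : Int) (k : Int) : Int :=
  let pos := ((PySem.List.pyRange 0 63 1).find? (fun i => decide (countB (i + 1) k ≥ n))).getD 0
  goB 64 pos n k 0

-- ===== PRECONDITION & SPEC =====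
-- A raises IndexError (dp[i][k] on rows of length max(k+1,0)) whenever k < 0.
def Pre_findNthNumber (n : Int) (k : Int) : Prop := 0 ≤ k
instance (n : Int) (k : Int) : Decidable (Pre_findNthNumber n k) := by unfold Pre_findNthNumber; infer_instance
def pvWitness_findNthNumber : Int × Int := (5, 2)

def Spec_findNthNumber (n : Int) (k : Int) (out : Int) : Prop := out = findNthNumber_alt n k
instance (n : Int) (k : Int) (out : Int) : Decidable (Spec_findNthNumber n k out) := by unfold Spec_findNthNumber; infer_instance

-- ===== CLAIM (what is proved, stated in full; the proofs are below) =====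
def Claim_equal_findNthNumber : Prop := ∀ (n : Int) (k : Int), Dom_findNthNumber n k → Pre_findNthNumber n k → Spec_findNthNumber n k (findNthNumber n k)

-- ===== LEMMAS AND PROOFS =====

-- A's ncr computes the binomial coefficient on the (bounded) arguments it is called with.
set_option maxRecDepth 4000 in
theorem ncrA_eq : ∀ m ∈ Finset.range 64, ∀ x ∈ Finset.range (m + 1),
    ncrA (m : Int) (x : Int) = (Nat.choose m x : Int) := by decide

-- B's Pascal table row m is the m-th row of binomial coefficients (rows 0..63).
set_option maxRecDepth 4000 in
theorem pascalB_row : ∀ m ∈ Finset.range 64,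
    PySem.List.pyGetD pascalB (m : Int) [] =
      (List.range (m + 1)).map (fun x => (Nat.choose m x : Int)) := by decide

theorem sum_map_range_int (n : Nat) (f : Nat → Int) :
    ((List.range n).map f).sum = ∑ x ∈ Finset.range n, f x := by
  induction n with
  | zero => simp
  | succ n ih => simp [List.range_succ, Finset.sum_range_succ, ih]

-- countB m j = Σ_{x ≤ min m j} C(m, x) for 1 ≤ m ≤ 63, 0 ≤ j
theorem countB_eq (m : Nat) (hm : m ≤ 63) (j : Int) (hj : 0 ≤ j) :
    countB (m : Int) j = ∑ x ∈ Finset.range (min m j.toNat + 1), (Nat.choose m x : Int) := by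
  unfold countB
  by_cases h : j ≥ (m : Int)
  · rw [if_pos h]
    have hmin : min m j.toNat = m := by omega
    have h2 := Nat.sum_range_choose m
    have : ((m : Int)).toNat = m := by omega
    rw [hmin, this]
    have : ((2 ^ m : Nat) : Int) = ∑ x ∈ Finset.range (m + 1), (Nat.choose m x : Int) := by
      rw [← h2]; push_cast; ring
    simpa using this.symm ▸ (by push_cast; ring : ((2:Int) ^ m = ((2 ^ m : Nat) : Int)))
  · rw [if_neg h]
    have hrow := pascalB_row m (by simp; omega)
    rw [hrow, PySem.List.slice_to _ (by omega : (0:Int) ≤ j + 1)]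
    have hjt : (j + 1).toNat = j.toNat + 1 := by omega
    have hjm : j.toNat < m := by omega
    rw [hjt, ← List.map_take, List.take_range]
    have hmin1 : min (j.toNat + 1) (m + 1) = j.toNat + 1 := by omega
    have hmin2 : min m j.toNat = j.toNat := by omega
    rw [hmin1, hmin2, ← List.sum_eq_foldl, sum_map_range_int]

-- A's dp cell value as the same binomial sum
theorem dpA_cell (k : Int) (hk : 0 ≤ k) (i : Nat) (hi : i < 63) (j : Int)
    (hj0 : 0 ≤ j) (hjk : j ≤ k) :
    dpGetA (dpA k) (i : Int) j
      = ∑ x ∈ Finset.range (min (i + 1) j.toNat + 1), (Nat.choose (i + 1) x : Int) := by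
  unfold dpGetA dpA
  rw [PySem.List.pyGetD_map_pyRange_of_nonneg _ 63 _ _ (by omega) (by exact_mod_cast hi)]
  rw [PySem.List.pyGetD_map_pyRange_of_nonneg _ (k + 1) _ _ hj0 (by omega)]
  rw [PySem.List.pyRange_zero]
  rw [List.foldl_map, PySem.List.foldl_add]
  rw [sum_map_range_int]
  have hN : (min ((i : Int) + 1) j + 1).toNat = min (i + 1) j.toNat + 1 := by omega
  rw [hN, zero_add]
  apply Finset.sum_congr rfl
  intro x hx
  simp only [Finset.mem_range] at hx
  have h1 := ncrA_eq (i + 1) (by simp only [Finset.mem_range]; omega) x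
    (by simp only [Finset.mem_range]; omega)
  push_cast at h1 ⊢
  exact h1

-- dp lookup = countB on every in-range argument pair
theorem dp_eq_count (k0 : Int) (hk0 : 0 ≤ k0) (i : Int) (hi0 : 0 ≤ i) (hi : i < 63)
    (j : Int) (hj0 : 0 ≤ j) (hjk : j ≤ k0) :
    dpGetA (dpA k0) i j = countB (i + 1) j := by
  have hi' : i = ((i.toNat : Nat) : Int) := by omega
  have h1 := dpA_cell k0 hk0 i.toNat (by omega) j hj0 hjk
  have h2 := countB_eq (i.toNat + 1) (by omega) j hj0
  rw [hi']
  rw [h1]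
  have : ((i.toNat + 1 : Nat) : Int) = (i.toNat : Int) + 1 := by push_cast; ring
  rw [← this, h2]

-- the two descents agree
theorem loop_eq (k0 : Int) (hk0 : 0 ≤ k0) (fuel : Nat) :
    ∀ pos n k ans : Int, pos < 63 → 0 ≤ k → k ≤ k0 →
    loopA fuel (dpA k0) pos n k ans = goB fuel pos n k ans := by
  induction fuel with
  | zero => intro pos n k ans _ _ _; rfl
  | succ fuel ih =>
    intro pos n k ans hpos hk hkk
    simp only [loopA, goB]
    by_cases hc : pos > -1 ∧ n > 0
    · rw [if_pos hc, if_neg (show ¬(pos < 0 ∨ n ≤ 0) by omega)]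
      by_cases hb : pos + 1 ≤ k
      · rw [if_pos hb, if_pos hb]; ring
      · rw [if_neg hb, if_neg hb]
        by_cases hp : pos > 0
        · have hdc : dpGetA (dpA k0) (pos - 1) k = countB pos k := by
            have := dp_eq_count k0 hk0 (pos - 1) (by omega) (by omega) k hk hkk
            rwa [show pos - 1 + 1 = pos by ring] at this
          rw [hdc]
          by_cases hlt : pos > 0 ∧ countB pos k < n
          · rw [if_pos hlt, if_pos hlt]
            exact ih (pos - 1) _ _ _ (by omega) (by omega) (by omega)
          · rw [if_neg hlt, if_neg hlt]
            exact ih (pos - 1) _ _ _ (by omega) hk hkk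
        · rw [if_neg (fun h => hp h.1), if_neg (fun h => hp h.1)]
          exact ih (pos - 1) _ _ _ (by omega) hk hkk
    · rw [if_neg hc, if_pos (show pos < 0 ∨ n ≤ 0 by omega)]

theorem find_congr (p q : Int → Bool) (l : List Int) (h : ∀ x ∈ l, p x = q x) :
    l.find? p = l.find? q := by
  induction l with
  | nil => rfl
  | cons a l ih =>
    simp only [List.find?_cons]
    rw [h a List.mem_cons_self]
    cases q a
    · exact ih (fun x hx => h x (List.mem_cons_of_mem a hx))
    · rfl

-- ===== VERDICT (by name: the statement is the Claim_ definition above) =====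
theorem findNthNumber_spec : Claim_equal_findNthNumber := by
  intro n k _ hk
  unfold Spec_findNthNumber
  simp only [findNthNumber, findNthNumber_alt]
  have hfind : (PySem.List.pyRange 0 63).find? (fun i => decide (dpGetA (dpA k) i k ≥ n))
      = (PySem.List.pyRange 0 63).find? (fun i => decide (countB (i + 1) k ≥ n)) := by
    apply find_congr
    intro x hx
    rw [PySem.List.mem_pyRange_one] at hx
    rw [dp_eq_count k hk x hx.1 hx.2 k hk le_rfl]
  rw [hfind]
  set pos := ((PySem.List.pyRange 0 63).find? (fun i => decide (countB (i + 1) k ≥ n))).getD 0 with hpos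
  have hposlt : pos < 63 := by
    rcases hfo : (PySem.List.pyRange 0 63).find? (fun i => decide (countB (i + 1) k ≥ n)) with _ | i
    · rw [hpos, hfo]; norm_num
    · have := List.mem_of_find?_eq_some hfo
      rw [PySem.List.mem_pyRange_one] at this
      rw [hpos, hfo]; exact this.2
  exact loop_eq k hk 64 pos n k 0 hposlt hk le_rfl
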